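-- pv_equiv track=rewrite | github.com/ValerioSpagnoli/University | Fondamenti di Informatica 1/Esercitazioni/Esercitazione 6/A_Ex2.py | A_Ex2
-- ===== SOURCE A (Python) =====
-- def A_Ex2(start,n):
--     somma = 0
--     if start%2==1:
--         for i in range(n):
--             d = start + i*2
--             somma = somma + d
--         return somma
--     if start%2==0:
--         start = start+1
--         somma = 0
--         for i in range(n):
--             d = start + i*2
--             somma = somma + d
--         return somma
-- ===== SOURCE B (Python) =====
-- def A_Ex2(start, n):
--     # closed-form arithmetic series: sum_{i<n} (s + 2i) = n*s + n*(n-1)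
--     s = start if start % 2 == 1 else start + 1
--     if n <= 0:
--         return 0
--     return n * s + n * (n - 1)
-- ===== Notes on version B (the rewrite author's own statement) =====
-- stated objective: faster
-- what changed: Replaces the O(n) summation loop over range(n) with the closed-form arithmetic-series formula n*s + n*(n-1) where s is start rounded up to odd.
import Mathlib
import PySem

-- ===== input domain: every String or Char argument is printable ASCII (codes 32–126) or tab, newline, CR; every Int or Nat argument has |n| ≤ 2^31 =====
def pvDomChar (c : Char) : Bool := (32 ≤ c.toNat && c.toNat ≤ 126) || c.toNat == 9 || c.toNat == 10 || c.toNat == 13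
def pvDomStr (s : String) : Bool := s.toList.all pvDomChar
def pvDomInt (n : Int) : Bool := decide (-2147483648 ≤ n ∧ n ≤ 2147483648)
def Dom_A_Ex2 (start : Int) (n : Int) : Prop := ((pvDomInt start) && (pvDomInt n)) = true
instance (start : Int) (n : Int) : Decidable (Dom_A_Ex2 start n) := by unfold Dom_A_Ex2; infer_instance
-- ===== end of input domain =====

-- B replaces A's O(n) summation loop with the closed-form arithmetic-series formula (faster, asymptotic).


-- ===== PORT A =====
-- literal transliteration: two 'if' branches, each summing start + i*2 over range(n)
def A_Ex2 (start : Int) (n : Int) : Int :=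
  if PySem.Int.mod start 2 = 1 then
    (PySem.List.pyRange 0 n 1).foldl (fun somma i => somma + (start + i * 2)) 0
  else if PySem.Int.mod start 2 = 0 then
    (PySem.List.pyRange 0 n 1).foldl (fun somma i => somma + ((start + 1) + i * 2)) 0
  else
    0  -- unreachable: start % 2 is always 0 or 1 in Python

-- ===== PORT B =====
def A_Ex2_alt (start : Int) (n : Int) : Int :=
  let s := if PySem.Int.mod start 2 = 1 then start else start + 1
  if n ≤ 0 then 0 else n * s + n * (n - 1)

-- ===== PRECONDITION & SPEC =====
def Spec_A_Ex2 (start : Int) (n : Int) (out : Int) : Prop := out = A_Ex2_alt start n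
instance (start : Int) (n : Int) (out : Int) : Decidable (Spec_A_Ex2 start n out) := by unfold Spec_A_Ex2; infer_instance

-- ===== CLAIM (what is proved, stated in full; the proofs are below) =====
def Claim_equal_A_Ex2 : Prop := ∀ (start : Int) (n : Int), Dom_A_Ex2 start n → Spec_A_Ex2 start n (A_Ex2 start n)

-- ===== LEMMAS AND PROOFS =====

theorem foldl_add_init (g : Int → Int) (xs : List Int) (init : Int) :
    xs.foldl (fun a i => a + g i) init = init + (xs.map g).sum := by
  induction xs generalizing init with
  | nil => simp
  | cons x xs ih => simp [List.foldl_cons, ih]; ring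

theorem sum_range_arith (s : Int) (m : Nat) :
    ((List.range m).map (fun (k : Nat) => s + (k : Int) * 2)).sum = m * s + m * (m - 1) := by
  induction m with
  | zero => simp
  | succ m ih =>
    rw [List.range_succ, List.map_append, List.sum_append, ih]
    simp
    ring

theorem loop_closed (s : Int) (n : Int) :
    (PySem.List.pyRange 0 n 1).foldl (fun somma i => somma + (s + i * 2)) 0 =
      if n ≤ 0 then 0 else n * s + n * (n - 1) := by
  by_cases h : n ≤ 0
  · rw [PySem.List.pyRange_one_eq_nil h]
    simp [h]
  · rw [PySem.List.pyRange_one, foldl_add_init]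
    simp only [List.map_map]
    have : ((List.range (n - 0).toNat).map (fun (k : Nat) => (0 : Int) + (k : Int))).map (fun i => s + i * 2) =
        (List.range (n - 0).toNat).map (fun (k : Nat) => s + (k : Int) * 2) := by
      rw [List.map_map]; apply List.map_congr_left; intro k _; simp
    rw [← List.map_map] at *
    rw [this, sum_range_arith]
    have hn : ((n - 0).toNat : Int) = n := by omega
    rw [hn]
    simp [h]

-- ===== VERDICT (by name: the statement is the Claim_ definition above) =====
theorem A_Ex2_spec : Claim_equal_A_Ex2 := by
  intro start n _
  unfold Spec_A_Ex2 A_Ex2 A_Ex2_alt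
  have hmod : PySem.Int.mod start 2 = 0 ∨ PySem.Int.mod start 2 = 1 := by
    have h2 : PySem.Int.mod start 2 = start % 2 := by
      simp [PySem.Int.mod, Int.fmod_eq_emod_of_nonneg]
    rw [h2]; omega
  rcases hmod with h | h <;> simp only [h, loop_closed] <;> norm_num
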